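-- pv_equiv track=rewrite | github.com/nathanMcL/Assessments_UnitTests | myAssessment/assessment.py | getMaxInformationGain
-- ===== SOURCE A (Python) =====
-- from collections import Counter
--
-- def getMaxInformationGain(dataSet, max_common_features):
--     # Count the frequency of each character in the dataset
--     char_count = Counter(char for data in dataSet for char in data)
--
--     # Sort the character counts in descending order
--     char_count_list = sorted(char_count.values(), reverse=True)
--
--     # Calculate cumulative sums for optimization
--     prefix_sum = [0] * (len(char_count_list) + 1)
--     for i in range(1, len(char_count_list) + 1):
--         prefix_sum[i] = prefix_sum[i - 1] + char_count_list[i - 1]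
--
--     max_gain = 0
--
--     # Calculate information gain
--     for i in range(min(max_common_features, len(char_count_list))):
--         sum_i = prefix_sum[i + 1]  # Sum of most common features up to index i
--         sum_j = prefix_sum[-1] - prefix_sum[i + 1]  # Remaining sum
--         max_gain = max(max_gain, sum_i - sum_j)
--
--     return max_gain
-- ===== SOURCE B (Python) =====
-- from collections import Counter
--
-- def getMaxInformationGain(dataSet, max_common_features):
--     # The gain 2*prefix(i+1) - total is monotone in i (counts are positive),
--     # so only the last admissible index matters: no prefix array, no loop.
--     counts = Counter(c for s in dataSet for c in s)
--     freqs = sorted(counts.values())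
--     total = sum(freqs)
--     k = min(max_common_features, len(freqs))
--     if k <= 0:
--         return 0
--     top = sum(freqs[len(freqs) - k:])
--     return max(0, 2 * top - total)
-- ===== Notes on version B (the rewrite author's own statement) =====
-- stated objective: simpler
-- what changed: The gain 2*prefix(i+1)-total is monotone in i because character counts are positive, so B replaces A's prefix-sum array and maximizing loop by a closed form: sum the top min(k,m) counts (tail of one ascending sort) and return max(0, 2*top-total).
import Mathlib
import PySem

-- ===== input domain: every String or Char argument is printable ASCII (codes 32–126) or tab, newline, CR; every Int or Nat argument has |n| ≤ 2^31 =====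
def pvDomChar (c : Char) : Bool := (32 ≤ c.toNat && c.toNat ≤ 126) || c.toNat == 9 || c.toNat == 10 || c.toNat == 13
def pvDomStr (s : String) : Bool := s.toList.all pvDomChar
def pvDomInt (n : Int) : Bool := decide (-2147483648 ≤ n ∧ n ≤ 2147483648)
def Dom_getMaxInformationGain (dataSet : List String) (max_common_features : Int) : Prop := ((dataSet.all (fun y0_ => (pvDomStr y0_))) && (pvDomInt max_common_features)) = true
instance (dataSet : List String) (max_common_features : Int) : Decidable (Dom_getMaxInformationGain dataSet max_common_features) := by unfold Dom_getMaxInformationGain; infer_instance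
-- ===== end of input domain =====

-- B replaces A's prefix-sum array and maximizing loop by a closed form (the gain is
-- monotone in i since counts are positive): sum the top min(k,m) counts and take max with 0.
-- ===== PORT A =====
-- shared by both ports: both Pythons build Counter(c for s in dataSet for c in s)
def pvChars (dataSet : List String) : List Char :=
  dataSet.flatMap (fun s => s.toList)

def getMaxInformationGain (dataSet : List String) (max_common_features : Int) : Int :=
  let char_count := PySem.Dict.counter (pvChars dataSet)
  let char_count_list := PySem.List.sorted char_count.values (fun v => v) true
  let m := char_count_list.length
  let prefix0 : List Int := List.replicate (m + 1) 0
  let prefix_sum := (PySem.List.pyRange 1 ((m : Int) + 1) 1).foldl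
      (fun p i =>
        PySem.List.pySetD p i
          (PySem.List.pyGetD p (i - 1) 0 + PySem.List.pyGetD char_count_list (i - 1) 0)) prefix0
  (PySem.List.pyRange 0 (min max_common_features (m : Int)) 1).foldl
      (fun max_gain i =>
        let sum_i := PySem.List.pyGetD prefix_sum (i + 1) 0
        let sum_j := PySem.List.pyGetD prefix_sum (-1) 0 - PySem.List.pyGetD prefix_sum (i + 1) 0
        max max_gain (sum_i - sum_j)) 0

-- ===== PORT B =====
def getMaxInformationGain_alt (dataSet : List String) (max_common_features : Int) : Int :=
  let counts := PySem.Dict.counter (pvChars dataSet)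
  let freqs := PySem.List.sorted counts.values (fun v => v) false
  let total := freqs.sum
  let k := min max_common_features (freqs.length : Int)
  if k ≤ 0 then 0
  else
    let top := (PySem.List.slice freqs (some ((freqs.length : Int) - k)) none).sum
    max 0 (2 * top - total)

-- ===== PRECONDITION & SPEC =====
def Spec_getMaxInformationGain (dataSet : List String) (max_common_features : Int) (out : Int) : Prop := out = getMaxInformationGain_alt dataSet max_common_features
instance (dataSet : List String) (max_common_features : Int) (out : Int) : Decidable (Spec_getMaxInformationGain dataSet max_common_features out) := by unfold Spec_getMaxInformationGain; infer_instance

-- ===== CLAIM (what is proved, stated in full; the proofs are below) =====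
def Claim_equal_getMaxInformationGain : Prop := ∀ (dataSet : List String) (max_common_features : Int), Dom_getMaxInformationGain dataSet max_common_features → Spec_getMaxInformationGain dataSet max_common_features (getMaxInformationGain dataSet max_common_features)

-- ===== LEMMAS AND PROOFS =====
-- prefix-sum loop characterization
lemma pv_prefix (cl : List Int) (n : Nat) (hn : n ≤ cl.length) :
  (List.range n).foldl
    (fun p (k : Nat) => PySem.List.pySetD p ((1:Int)+(k:Int))
        (PySem.List.pyGetD p ((1:Int)+(k:Int)-1) 0 + PySem.List.pyGetD cl ((1:Int)+(k:Int)-1) 0))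
    (List.replicate (cl.length+1) (0:Int))
  = (List.range (n+1)).map (fun j => (cl.take j).sum) ++ List.replicate (cl.length - n) (0:Int) := by
  induction n with
  | zero => simp [List.replicate_succ]
  | succ n ih =>
      have hn' : n ≤ cl.length := by omega
      rw [List.range_succ, List.foldl_append, ih hn']
      set A := (List.range (n+1)).map (fun j => (cl.take j).sum) with hA
      have hlenA : A.length = n + 1 := by simp [hA]
      have hsimp : (1:Int) + (n:Int) - 1 = ((n:Nat):Int) := by omega
      simp only [List.foldl_cons, List.foldl_nil, hsimp]
      have hget1 : PySem.List.pyGetD (A ++ List.replicate (cl.length - n) (0:Int)) ((n:Nat):Int) 0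
          = (cl.take n).sum := by
        rw [PySem.List.pyGetD_natCast]
        rw [List.getD_eq_getElem?_getD, List.getElem?_append_left (by omega)]
        simp [hA]
      have hget2 : PySem.List.pyGetD cl ((n:Nat):Int) 0 = cl[n]'(by omega) := by
        rw [PySem.List.pyGetD_natCast]
        rw [List.getD_eq_getElem?_getD, List.getElem?_eq_getElem (by omega)]
        simp
      rw [hget1, hget2]
      have hcast : (1:Int) + (n:Int) = (((n+1:Nat)):Int) := by omega
      rw [hcast, PySem.List.pySetD_natCast]
      rw [List.set_append]
      have : ¬ (n + 1 < A.length) := by omega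
      simp only [hlenA, lt_self_iff_false, if_false, Nat.sub_self]
      have hrep : cl.length - n = (cl.length - (n+1)) + 1 := by omega
      rw [hrep, List.replicate_succ, List.set_cons_zero]
      rw [List.range_succ (n := n+1), List.map_append, hA]
      simp only [List.map_cons, List.map_nil, List.append_assoc, List.cons_append, List.nil_append]
      rw [List.sum_take_succ cl n (by omega)]

-- fold-max over range with monotone f
lemma pv_foldmax (f : Nat → Int) (n : Nat) (hmono : ∀ i, i+1 < n → f i ≤ f (i+1)) :
  (List.range n).foldl (fun a i => max a (f i)) 0
    = if n = 0 then 0 else max 0 (f (n-1)) := by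
  induction n with
  | zero => simp
  | succ n ih =>
      rw [List.range_succ, List.foldl_append, ih (fun i hi => hmono i (by omega))]
      rcases Nat.eq_zero_or_pos n with h | h
      · subst h; simp
      · have h1 : f (n-1) ≤ f n := by
          have := hmono (n-1) (by omega)
          rwa [Nat.sub_add_cancel h] at this
        simp only [if_neg (by omega : ¬ n = 0), if_neg (by omega : ¬ n + 1 = 0)]
        simp only [List.foldl_cons, List.foldl_nil, Nat.add_sub_cancel]
        omega

lemma pv_getP (cl : List Int) (j : Nat) (hj : j < cl.length + 1) :
    ((List.range (cl.length+1)).map (fun j => (cl.take j).sum)).getD j 0 = (cl.take j).sum := by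
  rw [List.getD_eq_getElem?_getD]
  simp [hj]

lemma pv_counter_pos (xs : List Char) : ∀ v ∈ (PySem.Dict.counter xs).values, 1 ≤ v := by
  intro v hv
  have h : (PySem.Dict.counter xs).values = (PySem.Set.ofList xs).map (fun k => (xs.count k : Int)) := by
    simp [PySem.Dict.values, PySem.Dict.items_counter]
  rw [h] at hv
  simp only [List.mem_map] at hv
  obtain ⟨k, hk, rfl⟩ := hv
  have hm : k ∈ xs := (PySem.Set.mem_ofList xs k).1 hk
  have := List.count_pos_iff.2 hm
  omega

lemma pv_asc_rev (vals : List Int) :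
    PySem.List.sorted vals (fun v => v) false = (PySem.List.sorted vals (fun v => v) true).reverse := by
  exact ((((PySem.List.sorted_perm vals (fun v=>v) false).trans
      (PySem.List.sorted_perm vals (fun v=>v) true).symm).trans
      (List.reverse_perm _).symm)).eq_of_pairwise
    (fun a b _ _ h1 h2 => le_antisymm h1 h2)
    (PySem.List.sorted_pairwise vals (fun v=>v))
    ((List.pairwise_reverse).2 (PySem.List.sorted_pairwise_rev vals (fun v=>v)))

lemma pv_main (ds : List String) (mcf : Int) : getMaxInformationGain ds mcf = getMaxInformationGain_alt ds mcf := by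
  simp only [getMaxInformationGain, getMaxInformationGain_alt]
  set vals := (PySem.Dict.counter (pvChars ds)).values with hvals
  set desc := PySem.List.sorted vals (fun v => v) true with hdesc
  set asc := PySem.List.sorted vals (fun v => v) false with hasc
  have hrev : asc = desc.reverse := pv_asc_rev vals
  have hlen : asc.length = desc.length := by rw [hrev, List.length_reverse]
  have hpos : ∀ v ∈ desc, 1 ≤ v := by
    intro v hv
    exact pv_counter_pos (pvChars ds) v (((PySem.List.sorted_perm vals (fun v=>v) true)).mem_iff.1 hv)
  -- rewrite the prefix-sum fold
  have hpy : PySem.List.pyRange 1 ((desc.length : Int) + 1) 1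
      = (List.range desc.length).map (fun k : Nat => (1:Int) + (k:Int)) := by
    rw [PySem.List.pyRange_one]
    congr 1
    · congr 1; omega
  rw [hpy, List.foldl_map, pv_prefix desc desc.length le_rfl, Nat.sub_self]
  simp only [List.replicate_zero, List.append_nil]
  set P := (List.range (desc.length+1)).map (fun j => (desc.take j).sum) with hP
  have hPlen : P.length = desc.length + 1 := by simp [hP]
  have hPne : P ≠ [] := by intro h; rw [h] at hPlen; simp at hPlen
  have hlast : PySem.List.pyGetD P (-1) 0 = desc.sum := by
    rw [PySem.List.pyGetD_neg_one P 0 hPne, List.getLast_eq_getElem]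
    simp [hP]
  simp only [hlast]
  -- rewrite the max loop
  have hpy2 : PySem.List.pyRange 0 (min mcf (desc.length : Int)) 1
      = (List.range (min mcf (desc.length : Int)).toNat).map (fun k : Nat => (0:Int) + (k:Int)) := by
    rw [PySem.List.pyRange_one]
    congr 2
    omega
  rw [hpy2, List.foldl_map]
  simp only [zero_add]
  set T := (min mcf (desc.length : Int)).toNat with hT
  have hTle : T ≤ desc.length := by
    have := min_le_right mcf (desc.length : Int)
    omega
  have hgetP : ∀ j : Nat, j ≤ desc.length → PySem.List.pyGetD P ((j:Int)) 0 = (desc.take j).sum := by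
    intro j hj
    rw [PySem.List.pyGetD_natCast, hP, pv_getP desc j (by omega)]
  rw [pv_foldmax (fun k : Nat => PySem.List.pyGetD P ((k:Int)+1) 0
        - (desc.sum - PySem.List.pyGetD P ((k:Int)+1) 0)) T]
  · -- equal to B's closed form
    rw [hlen]
    have hsum : asc.sum = desc.sum := by rw [hrev, List.sum_reverse]
    rcases Nat.eq_zero_or_pos T with h0 | hpos'
    · rw [if_pos h0, if_pos (by omega)]
    · rw [if_neg (by omega), if_neg (by omega)]
      have hc : ((T-1 : Nat) : Int) + 1 = ((T : Nat) : Int) := by omega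
      rw [hc, hgetP T hTle, hsum]
      have hslice : PySem.List.slice asc (some ((desc.length : Int) - min mcf (desc.length : Int))) none
          = asc.drop (desc.length - T) := by
        rw [PySem.List.slice_from _ (by omega)]
        congr 1
        omega
      rw [hslice, hrev, List.drop_reverse, List.sum_reverse]
      have : desc.length - (desc.length - T) = T := by omega
      rw [this]
      omega
  · -- monotonicity
    intro i hi
    have h1 : ((i:Int)+1) = (((i+1:Nat)):Int) := by omega
    have h2 : (((i+1:Nat):Int)+1) = (((i+2:Nat)):Int) := by omega
    rw [h1, h2, hgetP (i+1) (by omega), hgetP (i+2) (by omega)]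
    have hstep : (desc.take (i+2)).sum = (desc.take (i+1)).sum + desc[i+1]'(by omega) := by
      exact List.sum_take_succ desc (i+1) (by omega)
    have hge : 1 ≤ desc[i+1]'(by omega) := hpos _ (List.getElem_mem _)
    omega

-- ===== VERDICT (by name: the statement is the Claim_ definition above) =====
theorem getMaxInformationGain_spec : Claim_equal_getMaxInformationGain := by
  intro ds mcf _
  unfold Spec_getMaxInformationGain
  exact pv_main ds mcf
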